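-- pv_equiv track=rewrite | github.com/DevLARLEY/PSSHBoxTool | psshboxtool.py | isZeroed
-- ===== SOURCE A (Python) =====
-- from itertools import zip_longest
--
-- def isZeroed(s):
-- 	if len(s) % 2 != 0:
-- 		return False
-- 	ar = [i+j for i,j in zip_longest(s[::2], s[1::2], fillvalue='0')]
-- 	for a in range(len(ar)):
-- 		if a % 2 != 0:
-- 			if ar[a] != '00':
-- 				return False
-- 	return True
-- ===== SOURCE B (Python) =====
-- def isZeroed(s):
--     if len(s) % 2 != 0:
--         return False
--     return all(c == '0' for c in s[2::4]) and all(c == '0' for c in s[3::4])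
-- ===== Notes on version B (the rewrite author's own statement) =====
-- stated objective: simpler
-- what changed: B drops the zip_longest pair-list construction and the odd-index modulo loop: it selects the characters A's odd pairs consist of directly with two stride-4 slices and checks each selected character is the zero digit.
import Mathlib
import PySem

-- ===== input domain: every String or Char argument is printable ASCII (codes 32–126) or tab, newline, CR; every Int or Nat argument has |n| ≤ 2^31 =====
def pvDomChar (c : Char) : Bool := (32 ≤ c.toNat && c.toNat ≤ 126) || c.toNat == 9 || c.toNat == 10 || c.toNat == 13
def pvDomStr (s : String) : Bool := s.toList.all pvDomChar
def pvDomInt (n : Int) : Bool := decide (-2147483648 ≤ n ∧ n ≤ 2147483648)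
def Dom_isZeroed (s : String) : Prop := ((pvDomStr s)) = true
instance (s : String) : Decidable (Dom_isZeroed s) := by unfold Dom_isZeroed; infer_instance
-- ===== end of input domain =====

-- B replaces A's zip_longest pair list and odd-index loop by the stride slices s[2::4]/s[3::4] checked all-zero (simpler).

-- ===== PORT A =====
-- s[::2] on a char list (indices 0, 2, 4, …)
def pvEveryOther : List Char → List Char
  | [] => []
  | [x] => [x]
  | x :: _ :: rest => x :: pvEveryOther rest

-- itertools.zip_longest with fillvalue '0'
def pvZipLongest : List Char → List Char → List (Char × Char)
  | [], [] => []
  | x :: xs, [] => (x, '0') :: pvZipLongest xs []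
  | [], y :: ys => ('0', y) :: pvZipLongest [] ys
  | x :: xs, y :: ys => (x, y) :: pvZipLongest xs ys

-- the 'for a in range(len(ar))' loop with its index counter (ar[a] != '00' becomes pair ≠ ('0','0'))
def pvLoopA : List (Char × Char) → Nat → Bool
  | [], _ => true
  | p :: rest, a =>
    if a % 2 ≠ 0 then
      if p ≠ ('0', '0') then false else pvLoopA rest (a + 1)
    else pvLoopA rest (a + 1)

def isZeroed (s : String) : Bool :=
  let l := s.toList
  if l.length % 2 ≠ 0 then false
  else
    let ar := pvZipLongest (pvEveryOther l) (pvEveryOther (l.drop 1))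
    pvLoopA ar 0

-- ===== PORT B =====
-- the stride-4 slice s[k::4], applied to l.drop k (indices 0, 4, 8, …)
def pvStride4 : List Char → List Char
  | [] => []
  | [x] => [x]
  | [x, _] => [x]
  | [x, _, _] => [x]
  | x :: _ :: _ :: _ :: rest => x :: pvStride4 rest

def isZeroed_alt (s : String) : Bool :=
  let l := s.toList
  if l.length % 2 ≠ 0 then false
  else (pvStride4 (l.drop 2)).all (· == '0') && (pvStride4 (l.drop 3)).all (· == '0')

-- ===== PRECONDITION & SPEC =====
def Spec_isZeroed (s : String) (out : Bool) : Prop := out = isZeroed_alt s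
instance (s : String) (out : Bool) : Decidable (Spec_isZeroed s out) := by unfold Spec_isZeroed; infer_instance

-- ===== CLAIM (what is proved, stated in full; the proofs are below) =====
def Claim_equal_isZeroed : Prop := ∀ (s : String), Dom_isZeroed s → Spec_isZeroed s (isZeroed s)

-- ===== LEMMAS AND PROOFS =====
theorem pvLoopA_mod (L : List (Char × Char)) (n : Nat) : pvLoopA L (n + 2) = pvLoopA L n := by
  induction L generalizing n with
  | nil => simp [pvLoopA]
  | cons p rest ih =>
    simp only [pvLoopA]
    have h2 : (n + 2) % 2 = n % 2 := by omega
    rw [h2, Nat.add_right_comm n 2 1, ih]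

theorem pvStride4_cons1 (x : Char) (r : List Char) :
    pvStride4 (x :: r) = x :: pvStride4 (r.drop 3) := by
  match r with
  | [] => simp [pvStride4]
  | [a] => simp [pvStride4]
  | [a, b] => simp [pvStride4]
  | a :: b :: c :: rs => simp [pvStride4]

theorem pvStride4_cons2 (x y : Char) (r : List Char) :
    pvStride4 (x :: y :: r) = x :: pvStride4 (r.drop 2) := by
  match r with
  | [] => simp [pvStride4]
  | [a] => simp [pvStride4]
  | a :: b :: rs => simp [pvStride4]

theorem pv_main (l : List Char) (h : l.length % 2 = 0) :
    pvLoopA (pvZipLongest (pvEveryOther l) (pvEveryOther (l.drop 1))) 0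
      = ((pvStride4 (l.drop 2)).all (· == '0') && (pvStride4 (l.drop 3)).all (· == '0')) := by
  match l with
  | [] => simp [pvEveryOther, pvZipLongest, pvLoopA, pvStride4]
  | [a] => simp at h
  | [a, b] => simp [pvEveryOther, pvZipLongest, pvLoopA, pvStride4]
  | [a, b, c] => simp at h
  | a :: b :: c :: d :: rest =>
    have h' : rest.length % 2 = 0 := by simp at h; omega
    have ih := pv_main rest h'
    have e1 : pvEveryOther (a :: b :: c :: d :: rest) = a :: c :: pvEveryOther rest := by
      simp [pvEveryOther]
    have e2 : pvEveryOther (b :: c :: d :: rest) = b :: d :: pvEveryOther (rest.drop 1) := by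
      cases rest <;> simp [pvEveryOther]
    have key := pvLoopA_mod (pvZipLongest (pvEveryOther rest) (pvEveryOther (rest.drop 1))) 0
    simp only [List.drop_succ_cons, List.drop_zero] at *
    rw [e1, e2]
    simp only [pvZipLongest, pvLoopA]
    norm_num
    simp only [List.drop_one] at key ih
    rw [key, ih, pvStride4_cons2 c d rest, pvStride4_cons1 d rest]
    simp only [List.all_cons]
    cases hc : (c == '0') <;> cases hd : (d == '0') <;> simp_all
termination_by l.length

-- ===== VERDICT (by name: the statement is the Claim_ definition above) =====
theorem isZeroed_spec : Claim_equal_isZeroed := by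
  intro s _
  show isZeroed s = isZeroed_alt s
  simp only [isZeroed, isZeroed_alt]
  split_ifs with h
  · rfl
  · exact pv_main s.toList (by omega)
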